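-- pv_equiv track=rewrite | github.com/BenjaminDay/SCB-Bot | image_rec_tester.py | relative
-- ===== SOURCE A (Python) =====
-- def relative(point, reference, mode = "from00")-> tuple: #Returns same lenght tuple inputted as point
--     if len(point) % 2 == 1:
--         raise CustomError('relative - tuple point must have an even number of items')
--     if len(point) > 2:
--         return (relative(point[:2], reference, mode) + relative(point[2:], reference, mode))  #Recursive call if the length of point is more than 2 that then concatenates tuples on the way up
--     if mode == "from00":  #Converts real point to be relative to reference
--         return (point[0] - reference[0], point[1] - reference[1])  #e.g. point (110, 150) turns into (10, 25) with reference (100, 125)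
--     else:  #Converts a relative to be a real value relative to (0, 0)
--         return (point[0] + reference[0], point[1] + reference[1])  #e.g. point (10, 25) turns into (110, 150) from reference (100, 125)
-- ===== SOURCE B (Python) =====
-- class CustomError(Exception):
--     pass
--
--
-- def relative(point, reference, mode="from00"):
--     # Single iterative pass instead of recursive pair-splitting.
--     if len(point) % 2 == 1:
--         raise CustomError('relative - tuple point must have an even number of items')
--     sign = -1 if mode == "from00" else 1
--     return tuple(point[i] + sign * reference[i % 2] for i in range(len(point)))
-- ===== Notes on version B (the rewrite author's own statement) =====
-- stated objective: faster
-- what changed: Replaced the recursive pair-splitting with slicing and tuple concatenation by one flat pass over the indices using reference[i % 2] and a sign chosen once from mode.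
-- crash fix: On an empty point tuple A raises IndexError (it reaches point[0]) while B naturally returns the empty tuple (). — e.g. on relative([], [100, 125], "from00"): A raises IndexError, B returns []
import Mathlib
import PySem

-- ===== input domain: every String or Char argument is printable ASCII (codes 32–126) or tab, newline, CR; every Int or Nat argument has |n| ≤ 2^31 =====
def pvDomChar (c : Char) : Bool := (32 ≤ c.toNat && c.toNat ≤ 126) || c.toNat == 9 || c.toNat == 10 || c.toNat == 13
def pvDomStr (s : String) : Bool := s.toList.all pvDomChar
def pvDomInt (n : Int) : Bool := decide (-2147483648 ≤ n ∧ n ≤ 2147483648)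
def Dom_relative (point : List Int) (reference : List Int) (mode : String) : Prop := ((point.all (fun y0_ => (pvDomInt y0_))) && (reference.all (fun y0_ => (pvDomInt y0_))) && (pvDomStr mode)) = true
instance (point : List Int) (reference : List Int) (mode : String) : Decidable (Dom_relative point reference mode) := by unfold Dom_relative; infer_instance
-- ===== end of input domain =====

-- B replaces A's quadratic recursive pair-splitting (slice + tuple concatenation) with one
-- flat O(n) indexed pass using reference[i % 2] and a sign chosen once from mode.


-- ===== PORT A =====
-- Literal port of A's recursion; on inputs where Python raises (odd length: CustomError,
-- empty point / short reference: IndexError) the port returns junk ([] / getD 0) — those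
-- inputs are outside Pre_relative.
def relative (point : List Int) (reference : List Int) (mode : String) : List Int :=
  if point.length % 2 == 1 then []
  else if point.length > 2 then
    relative (PySem.List.slice point none (some 2)) reference mode ++
    relative (PySem.List.slice point (some 2) none) reference mode
  else if mode == "from00" then
    [(PySem.List.pyGet? point 0).getD 0 - (PySem.List.pyGet? reference 0).getD 0,
     (PySem.List.pyGet? point 1).getD 0 - (PySem.List.pyGet? reference 1).getD 0]
  else
    [(PySem.List.pyGet? point 0).getD 0 + (PySem.List.pyGet? reference 0).getD 0,
     (PySem.List.pyGet? point 1).getD 0 + (PySem.List.pyGet? reference 1).getD 0]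
termination_by point.length
decreasing_by
  · simp [PySem.List.slice_to point (by omega : (0:Int) ≤ 2)]; omega
  · simp [PySem.List.slice_from point (by omega : (0:Int) ≤ 2)]; omega

-- ===== PORT B =====
def relative_alt (point : List Int) (reference : List Int) (mode : String) : List Int :=
  if point.length % 2 == 1 then []
  else
    let sign : Int := if mode == "from00" then -1 else 1
    (List.range point.length).map (fun i =>
      (PySem.List.pyGet? point ((i : Nat) : Int)).getD 0 +
      sign * (PySem.List.pyGet? reference (((i % 2 : Nat)) : Int)).getD 0)

-- ===== PRECONDITION & SPEC =====
-- Pre_ excludes exactly the inputs where the Python A raises: odd-length point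
-- (CustomError), empty point and reference shorter than 2 (IndexError).
def Pre_relative (point : List Int) (_reference : List Int) (_mode : String) : Prop :=
  point.length % 2 = 0 ∧ point ≠ [] ∧ 2 ≤ _reference.length
instance (point : List Int) (reference : List Int) (mode : String) : Decidable (Pre_relative point reference mode) := by unfold Pre_relative; infer_instance

def pvWitness_relative : List Int × List Int × String := ([110, 150, 3, 4], [100, 125], "from00")

-- On an empty point tuple A raises IndexError (it reaches point[0]) while B naturally returns the empty tuple ().
def Raises_relative (point : List Int) (_reference : List Int) (_mode : String) : Prop := point = []
instance (point : List Int) (reference : List Int) (mode : String) : Decidable (Raises_relative point reference mode) := by unfold Raises_relative; infer_instance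
def pvRaiseWitness_relative : List Int × List Int × String := ([], [100, 125], "from00")
def pvRaiseWitnessOut_relative : List Int := []

def Spec_relative (point : List Int) (reference : List Int) (mode : String) (out : List Int) : Prop := out = relative_alt point reference mode
instance (point : List Int) (reference : List Int) (mode : String) (out : List Int) : Decidable (Spec_relative point reference mode out) := by unfold Spec_relative; infer_instance

-- ===== CLAIM (what is proved, stated in full; the proofs are below) =====
def Claim_equal_relative : Prop := ∀ (point : List Int) (reference : List Int) (mode : String), Dom_relative point reference mode → Pre_relative point reference mode → Spec_relative point reference mode (relative point reference mode)
def Claim_raises_relative : Prop := (∀ (point : List Int) (reference : List Int) (mode : String), Dom_relative point reference mode → Raises_relative point reference mode → ¬ Pre_relative point reference mode) ∧ (Dom_relative (pvRaiseWitness_relative.1) (pvRaiseWitness_relative.2.1) (pvRaiseWitness_relative.2.2) ∧ Raises_relative (pvRaiseWitness_relative.1) (pvRaiseWitness_relative.2.1) (pvRaiseWitness_relative.2.2) ∧ relative_alt (pvRaiseWitness_relative.1) (pvRaiseWitness_relative.2.1) (pvRaiseWitness_relative.2.2) = pvRaiseWitnessOut_relative)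

-- ===== LEMMAS AND PROOFS =====

-- B on a::b::rest (even total length) peels the first pair off the flat pass.
theorem relative_alt_nil (reference : List Int) (mode : String) :
    relative_alt [] reference mode = [] := by
  simp [relative_alt]

theorem relative_alt_cons (a b : Int) (rest reference : List Int) (mode : String)
    (h : rest.length % 2 = 0) :
    relative_alt (a :: b :: rest) reference mode =
      (a + (if mode == "from00" then -1 else 1) * (PySem.List.pyGet? reference 0).getD 0) ::
      (b + (if mode == "from00" then -1 else 1) * (PySem.List.pyGet? reference 1).getD 0) ::
      relative_alt rest reference mode := by
  have h2 : (rest.length + 1 + 1) % 2 = 0 := by omega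
  unfold relative_alt
  simp only [List.length_cons, h2, h, beq_iff_eq, Nat.zero_ne_one, if_false,
    List.range_succ_eq_map, List.map_cons, List.map_map]
  refine congrArg₂ _ ?_ (congrArg₂ _ ?_ ?_)
  · simp
  · simp
  · refine List.map_congr_left (fun i _ => ?_)
    have : (Nat.succ ∘ Nat.succ) i = i + 2 := rfl
    simp only [Function.comp_apply, PySem.List.pyGet?_natCast]
    have hm : (i + 1 + 1) % 2 = i % 2 := by omega
    simp [hm, List.getElem?_cons_succ]

theorem relative_eq_alt (point reference : List Int) (mode : String)
    (he : point.length % 2 = 0) (hne : point ≠ []) :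
    relative point reference mode = relative_alt point reference mode := by
  match point, he, hne with
  | [a, b], _, _ =>
    have g0 : (PySem.List.pyGet? ([a, b] : List Int) (0:Int)).getD 0 = a := by
      simp [PySem.List.pyGet?, PySem.List.pyIdx?]
    have g1 : (PySem.List.pyGet? ([a, b] : List Int) (1:Int)).getD 0 = b := by
      simp [PySem.List.pyGet?, PySem.List.pyIdx?]
    rw [relative, relative_alt_cons a b [] reference mode (by norm_num), relative_alt_nil]
    norm_num [g0, g1]
    split_ifs with hm <;> refine congrArg₂ _ (by ring) (congrArg₂ _ (by ring) rfl)
  | a :: b :: c :: rest, he, _ =>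
    have hodd : rest.length % 2 = 1 := by simp at he; omega
    have hs1 : PySem.List.slice (a :: b :: c :: rest) none (some 2) = [a, b] := by
      rw [PySem.List.slice_to _ (by omega : (0:Int) ≤ 2)]; rfl
    have hs2 : PySem.List.slice (a :: b :: c :: rest) (some 2) none = c :: rest := by
      rw [PySem.List.slice_from _ (by omega : (0:Int) ≤ 2)]; rfl
    rw [relative]
    simp only [List.length_cons, if_pos (by omega : rest.length + 1 + 1 + 1 > 2), hs1, hs2]
    rw [relative_eq_alt [a, b] reference mode (by norm_num) (by simp),
        relative_eq_alt (c :: rest) reference mode (by simp; omega) (by simp),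
        relative_alt_cons a b [] reference mode (by norm_num), relative_alt_nil,
        relative_alt_cons a b (c :: rest) reference mode (by simp; omega)]
    rw [if_neg (by simp; omega)]
    rfl
termination_by point.length

-- ===== VERDICT (by name: the statement is the Claim_ definition above) =====
theorem relative_spec : Claim_equal_relative := by
  intro point reference mode _ hpre
  exact relative_eq_alt point reference mode hpre.1 hpre.2.1

@[simp]
theorem relative_raises : Claim_raises_relative := by
  unfold Claim_raises_relative
  constructor
  · intro point reference mode _ hr hpre; exact hpre.2.1 hr
  · exact ⟨by decide, by decide, by decide⟩
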